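-- pv_equiv track=rewrite | github.com/LeoYANQING/AskThenRearrange | task_matter_json_dist.py | match_object
-- ===== SOURCE A (Python) =====
-- from typing import Dict, List, Optional, Tuple, Type, TypeVar
--
-- def match_object(name: str, candidates: List[str]) -> Optional[str]:
--     name = name.lower().strip()
--     for cand in candidates:
--         if cand.lower() == name:
--             return cand
--     # Partial match
--     for cand in candidates:
--         if cand.lower() in name or name in cand.lower():
--             return cand
--     return None
-- ===== SOURCE B (Python) =====
-- from typing import List, Optional
--
-- def match_object(name: str, candidates: List[str]) -> Optional[str]:
--     name = name.lower().strip()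
--     first_partial = None
--     for cand in candidates:
--         c = cand.lower()
--         if c == name:
--             return cand
--         if first_partial is None and (c in name or name in c):
--             first_partial = cand
--     return first_partial
-- ===== Notes on version B (the rewrite author's own statement) =====
-- stated objective: alternative
-- what changed: Replaces A's two sequential scans (exact pass, then partial pass) with a single pass that remembers the first partial match and returns it only if no exact match is found.
import Mathlib
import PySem

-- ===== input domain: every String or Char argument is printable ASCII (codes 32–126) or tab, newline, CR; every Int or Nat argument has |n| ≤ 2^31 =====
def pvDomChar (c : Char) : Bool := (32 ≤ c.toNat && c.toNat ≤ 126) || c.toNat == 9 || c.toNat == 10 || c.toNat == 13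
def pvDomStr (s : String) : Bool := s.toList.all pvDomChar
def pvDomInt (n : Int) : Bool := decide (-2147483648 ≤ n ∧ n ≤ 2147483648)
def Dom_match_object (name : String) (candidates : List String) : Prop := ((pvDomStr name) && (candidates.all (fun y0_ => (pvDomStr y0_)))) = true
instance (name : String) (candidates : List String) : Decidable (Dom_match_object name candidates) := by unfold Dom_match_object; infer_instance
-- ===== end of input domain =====

-- B merges A's two sequential scans into one pass that remembers the first partial match (objective: alternative single-pass decomposition).
-- ===== PORT A =====
def match_object (name : String) (candidates : List String) : Option String :=
  let name := PySem.Str.strip (PySem.Str.lower name)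
  match candidates.find? (fun cand => PySem.Str.lower cand == name) with
  | some cand => some cand
  | none =>
    match candidates.find? (fun cand =>
        PySem.Str.isIn (PySem.Str.lower cand) name || PySem.Str.isIn name (PySem.Str.lower cand)) with
    | some cand => some cand
    | none => none

-- ===== PORT B =====
def matchLoop (name : String) : List String → Option String → Option String
  | [], firstPartial => firstPartial
  | cand :: rest, firstPartial =>
    let c := PySem.Str.lower cand
    if c == name then some cand
    else matchLoop name rest
      (if firstPartial.isNone && (PySem.Str.isIn c name || PySem.Str.isIn name c)
       then some cand else firstPartial)

def match_object_alt (name : String) (candidates : List String) : Option String :=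
  matchLoop (PySem.Str.strip (PySem.Str.lower name)) candidates none

-- ===== PRECONDITION & SPEC =====
def Spec_match_object (name : String) (candidates : List String) (out : Option String) : Prop := out = match_object_alt name candidates
instance (name : String) (candidates : List String) (out : Option String) : Decidable (Spec_match_object name candidates out) := by unfold Spec_match_object; infer_instance

-- ===== CLAIM (what is proved, stated in full; the proofs are below) =====
def Claim_equal_match_object : Prop := ∀ (name : String) (candidates : List String), Dom_match_object name candidates → Spec_match_object name candidates (match_object name candidates)

-- ===== LEMMAS AND PROOFS =====

-- B's single loop equals: first exact match, else the carried partial, else the first partial match.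
theorem matchLoop_eq (n : String) (xs : List String) (fp : Option String) :
    matchLoop n xs fp =
      match xs.find? (fun cand => PySem.Str.lower cand == n) with
      | some cand => some cand
      | none =>
        match fp with
        | some p => some p
        | none => xs.find? (fun cand =>
            PySem.Str.isIn (PySem.Str.lower cand) n || PySem.Str.isIn n (PySem.Str.lower cand)) := by
  induction xs generalizing fp with
  | nil => cases fp <;> simp [matchLoop]
  | cons cand rest ih =>
    simp only [matchLoop, List.find?]
    by_cases hx : (PySem.Str.lower cand == n) = true
    · simp only [hx, if_true]
    · simp only [hx, if_false, Bool.false_eq_true]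
      rw [ih]
      cases hfind : rest.find? (fun c => PySem.Str.lower c == n) with
      | some c => rfl
      | none =>
        cases fp with
        | some p => rfl
        | none =>
          simp only [Option.isNone_none, Bool.true_and]
          cases hp : (PySem.Str.isIn (PySem.Str.lower cand) n
              || PySem.Str.isIn n (PySem.Str.lower cand)) with
          | true => simp only [hp, if_true]
          | false => simp only [hp, if_false, Bool.false_eq_true]

-- ===== VERDICT (by name: the statement is the Claim_ definition above) =====
theorem match_object_spec : Claim_equal_match_object := by
  intro name candidates _
  unfold Spec_match_object match_object match_object_alt
  rw [matchLoop_eq]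
  dsimp only
  cases h1 : candidates.find? (fun cand => PySem.Str.lower cand == PySem.Str.strip (PySem.Str.lower name)) with
  | some c => rfl
  | none =>
    cases h2 : candidates.find? (fun cand =>
        PySem.Str.isIn (PySem.Str.lower cand) (PySem.Str.strip (PySem.Str.lower name))
          || PySem.Str.isIn (PySem.Str.strip (PySem.Str.lower name)) (PySem.Str.lower cand)) with
    | some c => rfl
    | none => rfl
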